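-- pv_equiv track=rewrite | github.com/HaydenInEdinburgh/LintCode | 1890_form_minimum_number.py | formMinimumNumber
-- ===== SOURCE A (Python) =====
-- def formMinimumNumber(string):
--     # Write your code here.
--     if not string:
--         return ""
--
--     string = 'I' + string
--     digits = [str(d) for d in range(9, 0, -1)]
--     res = ''
--     left, right = 0, 1
--     while len(res) < len(string):
--         if right < len(string) and string[right] != 'I':
--             right += 1
--             continue
--         #find next I
--         tmp = ''
--         for _ in range(right-left):
--             char = digits.pop()
--             tmp += char
--         res += tmp[::-1]
--         left = right
--         right += 1
--
--     return res
-- ===== SOURCE B (Python) =====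
-- def formMinimumNumber(string):
--     if not string:
--         return ""
--
--     def go(pattern, base):
--         # length of the leading run of non-'I' characters
--         k = 0
--         while k < len(pattern) and pattern[k] != 'I':
--             k += 1
--         block = ''
--         for j in range(k + 1):
--             block += str(base + k + 1 - j)
--         if k < len(pattern):
--             return block + go(pattern[k + 1:], base + k + 1)
--         return block
--
--     return go(string, 0)
-- ===== Notes on version B (the rewrite author's own statement) =====
-- stated objective: alternative
-- what changed: Replaced A's pointer-driven while-loop over 'I'+string with a digit pool popped and per-run slice reversal by a recursive decomposition: strip the leading non-'I' run of length k, emit the descending numerals base+k+1..base+1 directly, and recurse past the 'I' with the shifted base (no pool, no pointers, no reversal).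
import Mathlib
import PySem

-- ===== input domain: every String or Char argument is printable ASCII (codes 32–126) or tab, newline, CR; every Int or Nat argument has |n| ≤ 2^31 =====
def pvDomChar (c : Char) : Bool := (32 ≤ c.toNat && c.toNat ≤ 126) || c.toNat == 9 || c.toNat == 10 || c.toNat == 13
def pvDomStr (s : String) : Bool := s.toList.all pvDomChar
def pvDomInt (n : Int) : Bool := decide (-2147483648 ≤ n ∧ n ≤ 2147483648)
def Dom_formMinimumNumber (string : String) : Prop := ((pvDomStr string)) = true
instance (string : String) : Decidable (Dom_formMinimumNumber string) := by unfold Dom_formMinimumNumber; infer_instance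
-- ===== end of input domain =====

-- B replaces A's pointer scan with digit pool and per-run reversal by a recursion that strips the
-- leading non-'I' run and emits a descending arithmetic range of numerals (objective: alternative).

-- ===== PORT A =====
-- inner loop `for _ in range(right-left): char = digits.pop(); tmp += char`
-- (digits.pop() pops the LAST element; none = IndexError, A raises there)
def aPop (k : Nat) (digits tmp : List Char) : Option (List Char × List Char) :=
  match k with
  | 0 => some (tmp, digits)
  | k + 1 =>
    match digits.getLast? with
    | none => none
    | some c => aPop k digits.dropLast (tmp ++ [c])

-- the while loop, fuel-bounded for totality (fuel 2*len+4 exceeds the loop's iteration count;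
-- on IndexError — aPop = none — the loop stops, an input Pre_ excludes)
def aLoop (isI : α → Bool) (s : List α) (fuel : Nat) (digits res : List Char)
    (left right : Nat) : List Char :=
  match fuel with
  | 0 => res
  | fuel + 1 =>
    if res.length < s.length then
      if h : right < s.length then
        if ¬ isI s[right] then
          aLoop isI s fuel digits res left (right + 1)
        else
          match aPop (right - left) digits [] with
          | none => res
          | some (tmp, digits') => aLoop isI s fuel digits' (res ++ tmp.reverse) right (right + 1)
      else
        match aPop (right - left) digits [] with
        | none => res
        | some (tmp, digits') => aLoop isI s fuel digits' (res ++ tmp.reverse) right (right + 1)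
    else res

def formMinimumNumber (string : String) : String :=
  if string.toList.isEmpty then "" else
    -- string = 'I' + string
    String.mk (aLoop (· == 'I') ('I' :: string.toList)
      (2 * ('I' :: string.toList).length + 4) ['9','8','7','6','5','4','3','2','1'] [] 0 1)

-- ===== PORT B =====
-- go(pattern, base): k = length of the leading run of non-'I' chars (the while loop);
-- `for j in range(k+1): block += str(base+k+1-j)`; recurse past the 'I' with base+k+1.
-- fuel bounds the recursion depth only (each call consumes ≥ 1 character, so
-- fuel = pattern.length + 1 is never exhausted); structural so the kernel can evaluate it
def bGo {α : Type} (isI : α → Bool) (pattern : List α) (base : Int) (fuel : Nat) : List Char :=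
  match fuel with
  | 0 => []
  | fuel + 1 =>
    let k := (pattern.takeWhile (fun c => !isI c)).length
    -- str(d) on the List Char side is PySem.Int.toChars
    let block := (List.range (k + 1)).foldl
      (fun acc (j : Nat) => acc ++ PySem.Int.toChars ((base : Int) + k + 1 - j)) []
    if k < pattern.length then block ++ bGo isI (pattern.drop (k + 1)) (base + k + 1) fuel
    else block

def formMinimumNumber_alt (string : String) : String :=
  if string.toList.isEmpty then "" else
    String.mk (bGo (· == 'I') string.toList 0 (string.toList.length + 1))

-- ===== PRECONDITION & SPEC =====
-- Pre_ excludes exactly the inputs where Python A raises IndexError (patterns of length ≥ 9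
-- exhaust A's 9-digit pool).
def Pre_formMinimumNumber (string : String) : Prop := string.length ≤ 8
instance (string : String) : Decidable (Pre_formMinimumNumber string) := by
  unfold Pre_formMinimumNumber; infer_instance

def pvWitness_formMinimumNumber : String := "IDID"

def Spec_formMinimumNumber (string : String) (out : String) : Prop := out = formMinimumNumber_alt string
instance (string : String) (out : String) : Decidable (Spec_formMinimumNumber string out) := by unfold Spec_formMinimumNumber; infer_instance

-- ===== CLAIM (what is proved, stated in full; the proofs are below) =====
def Claim_equal_formMinimumNumber : Prop := ∀ (string : String), Dom_formMinimumNumber string → Pre_formMinimumNumber string → Spec_formMinimumNumber string (formMinimumNumber string)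

-- ===== LEMMAS AND PROOFS =====

-- both programs inspect their characters only through `isI`, so they factor through the Bool mask
theorem aLoop_map {α : Type} (isI : α → Bool) (s : List α) (fuel : Nat)
    (digits res : List Char) (left right : Nat) :
    aLoop isI s fuel digits res left right
      = aLoop id (s.map isI) fuel digits res left right := by
  induction fuel generalizing digits res left right with
  | zero => rfl
  | succ fuel ih =>
    simp only [aLoop, List.length_map]
    split
    · split
      · next h =>
        simp only [List.getElem_map, id]
        split
        · exact ih _ _ _ _
        · split
          · rfl
          · exact ih _ _ _ _
      · split
        · rfl
        · exact ih _ _ _ _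
    · rfl

theorem bGo_map {α : Type} (isI : α → Bool) (fuel : Nat) (pattern : List α) (base : Int) :
    bGo isI pattern base fuel = bGo id (pattern.map isI) base fuel := by
  induction fuel generalizing pattern base with
  | zero => rfl
  | succ fuel ih =>
    simp only [bGo]
    have htw : ((pattern.map isI).takeWhile (fun c => !id c)).length
        = (pattern.takeWhile (fun c => !isI c)).length := by
      rw [List.takeWhile_map]; simp [Function.comp_def]
    simp only [htw, List.length_map, ← List.map_drop]
    split
    · rw [ih]
    · rfl

-- digit character of d (str(d) for a one-digit d)
def cOf (d : Nat) : Char := Char.ofNat (48 + d)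

-- an evaluation-friendly clone of bGo's mask form for single-digit bases (proof-side only)
def bGoN (bs : List Bool) (base : Nat) (fuel : Nat) : List Char :=
  match fuel with
  | 0 => []
  | fuel + 1 =>
    let k := (bs.takeWhile (fun c => !c)).length
    let block := (List.range (k + 1)).map (fun j => cOf (base + k + 1 - j))
    if k < bs.length then block ++ bGoN (bs.drop (k + 1)) (base + k + 1) fuel
    else block

theorem toChars_digit (d : Nat) (h1 : 1 ≤ d) (h9 : d ≤ 9) :
    PySem.Int.toChars (d : Int) = [cOf d] := by
  interval_cases d <;> rfl

-- a left fold appending one-element chunks is a map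
theorem foldl_append_singleton' {β : Type} (l : List β) (g : β → List Char) (f : β → Char)
    (h : ∀ j ∈ l, g j = [f j]) (acc : List Char) :
    l.foldl (fun a j => a ++ g j) acc = acc ++ l.map f := by
  induction l generalizing acc with
  | nil => simp
  | cons x xs ih =>
    simp only [List.foldl_cons, List.map_cons]
    rw [h x (by simp), ih (fun j hj => h j (by simp [hj]))]
    simp

theorem bGo_eq_bGoN (fuel : Nat) (bs : List Bool) (base : Nat)
    (hb : base + bs.length + 1 ≤ 9) :
    bGo id bs (base : Int) fuel = bGoN bs base fuel := by
  induction fuel generalizing bs base with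
  | zero => rfl
  | succ fuel ih =>
    simp only [bGo, bGoN, id_eq]
    have hk : (bs.takeWhile (fun c => !c)).length ≤ bs.length :=
      (List.takeWhile_prefix _).length_le
    have hfun : ∀ j ∈ List.range ((bs.takeWhile (fun c => !c)).length + 1),
        PySem.Int.toChars ((base : Int) + (bs.takeWhile (fun c => !c)).length + 1 - j)
          = [cOf (base + (bs.takeWhile (fun c => !c)).length + 1 - j)] := by
      intro j hj
      have hjk : j ≤ (bs.takeWhile (fun c => !c)).length := by
        have := List.mem_range.mp hj; omega
      have hcast : ((base : Int) + (bs.takeWhile (fun c => !c)).length + 1 - j)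
          = ((base + (bs.takeWhile (fun c => !c)).length + 1 - j : Nat) : Int) := by
        omega
      rw [hcast, toChars_digit _ (by omega) (by omega)]
    have hblock :
        (List.range ((bs.takeWhile (fun c => !c)).length + 1)).foldl
          (fun acc (j : Nat) => acc ++ PySem.Int.toChars
            ((base : Int) + (bs.takeWhile (fun c => !c)).length + 1 - j)) []
        = (List.range ((bs.takeWhile (fun c => !c)).length + 1)).map
            (fun j => cOf (base + (bs.takeWhile (fun c => !c)).length + 1 - j)) := by
      have := foldl_append_singleton'
        (List.range ((bs.takeWhile (fun c => !c)).length + 1))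
        (fun j => PySem.Int.toChars
          ((base : Int) + (bs.takeWhile (fun c => !c)).length + 1 - j))
        (fun j => cOf (base + (bs.takeWhile (fun c => !c)).length + 1 - j))
        hfun []
      simpa only [List.nil_append] using this
    rw [hblock]
    split
    · next hlt =>
      have : (base : Int) + (bs.takeWhile (fun c => !c)).length + 1
          = ((base + (bs.takeWhile (fun c => !c)).length + 1 : Nat) : Int) := by push_cast; ring
      rw [this, ih]
      simp only [List.length_drop]
      omega
    · rfl

-- enumeration of all Bool masks of a given length
def allBools : Nat → List (List Bool)
  | 0 => [[]]
  | n + 1 => (allBools n).flatMap fun l => [true :: l, false :: l]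

theorem mem_allBools (bs : List Bool) : bs ∈ allBools bs.length := by
  induction bs with
  | nil => simp [allBools]
  | cons b t ih =>
    simp only [List.length_cons, allBools, List.mem_flatMap]
    exact ⟨t, ih, by cases b <;> simp⟩

-- the two cores agree on every mask of length ≤ 8 (checked exhaustively)
def coresAgree (bs : List Bool) : Bool :=
  aLoop id (true :: bs) (2 * (bs.length + 1) + 4) ['9','8','7','6','5','4','3','2','1'] [] 0 1
    == bGoN bs 0 (bs.length + 1)

set_option maxRecDepth 8192 in
theorem cores_agree_le8 (bs : List Bool) (h : bs.length ≤ 8) :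
    aLoop id (true :: bs) (2 * (bs.length + 1) + 4) ['9','8','7','6','5','4','3','2','1'] [] 0 1
      = bGoN bs 0 (bs.length + 1) := by
  have hall : ((List.range 9).all fun n => (allBools n).all coresAgree) = true := by decide
  have hb : coresAgree bs = true := by
    have h1 := List.all_eq_true.mp hall bs.length (by simp; omega)
    exact List.all_eq_true.mp h1 bs (mem_allBools bs)
  simpa [coresAgree] using hb

-- ===== VERDICT (by name: the statements are the Claim_ definitions above) =====
theorem formMinimumNumber_spec : Claim_equal_formMinimumNumber := by
  intro s _ hpre
  unfold Spec_formMinimumNumber formMinimumNumber formMinimumNumber_alt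
  split
  · rfl
  · next hne =>
    have hlen : s.toList.length ≤ 8 := hpre
    rw [aLoop_map, bGo_map]
    have : ('I' :: s.toList).map (· == 'I') = true :: s.toList.map (· == 'I') := by simp
    rw [this]
    have hl : (s.toList.map (· == 'I')).length = s.toList.length := by simp
    have hbn : bGo id (s.toList.map (· == 'I')) ((0 : Nat) : Int) (s.toList.length + 1)
        = bGoN (s.toList.map (· == 'I')) 0 (s.toList.length + 1) := by
      have := bGo_eq_bGoN (s.toList.length + 1) (s.toList.map (· == 'I')) 0 (by omega)
      simpa [hl] using this
    have hc := cores_agree_le8 (s.toList.map (· == 'I')) (by omega)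
    simp only [hl] at hc
    simp only [Nat.cast_zero] at hbn
    simp only [List.length_cons]
    rw [hbn, hc]
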